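-- pv_equiv track=rewrite | github.com/audriusspiridavicius/hackerrank-exercises | jorney_to_the_moon/index.py | get_total_combinations
-- ===== SOURCE A (Python) =====
-- from functools import reduce
--
-- def get_total_combinations(astronaut_groups,n):
--
--     rest_countries = n - sum(astronaut_groups)
--
--     rest_countries_combinations = reduce(lambda x,y: x + y, range(0,rest_countries)) if rest_countries > 0 else 0
--
--     single_person_countries_combinations = 0
--     country_groups_combinations = 0
--     for index,group_size in enumerate(astronaut_groups):
--         single_person_countries_combinations = single_person_countries_combinations + group_size * rest_countries
--         for following_groups in astronaut_groups[index + 1:]: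
--             country_groups_combinations = country_groups_combinations + group_size * following_groups
--
--     total_combinations = country_groups_combinations + single_person_countries_combinations + rest_countries_combinations
--
--     return total_combinations
-- ===== SOURCE B (Python) =====
-- def get_total_combinations(astronaut_groups, n):
--     s = 0
--     q = 0
--     for g in astronaut_groups:
--         s += g
--         q += g * g
--     rest = n - s
--     pair_groups = (s * s - q) // 2
--     rest_pairs = rest * (rest - 1) // 2 if rest > 0 else 0
--     return pair_groups + s * rest + rest_pairs
-- ===== Notes on version B (the rewrite author's own statement) =====
-- stated objective: faster
-- what changed: Replaces the O(k^2) nested loop over group pairs and the reduce over range with a single pass computing sum and sum of squares, then closed forms (S^2 - sum(g^2))/2 and r(r-1)/2.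
import Mathlib
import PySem

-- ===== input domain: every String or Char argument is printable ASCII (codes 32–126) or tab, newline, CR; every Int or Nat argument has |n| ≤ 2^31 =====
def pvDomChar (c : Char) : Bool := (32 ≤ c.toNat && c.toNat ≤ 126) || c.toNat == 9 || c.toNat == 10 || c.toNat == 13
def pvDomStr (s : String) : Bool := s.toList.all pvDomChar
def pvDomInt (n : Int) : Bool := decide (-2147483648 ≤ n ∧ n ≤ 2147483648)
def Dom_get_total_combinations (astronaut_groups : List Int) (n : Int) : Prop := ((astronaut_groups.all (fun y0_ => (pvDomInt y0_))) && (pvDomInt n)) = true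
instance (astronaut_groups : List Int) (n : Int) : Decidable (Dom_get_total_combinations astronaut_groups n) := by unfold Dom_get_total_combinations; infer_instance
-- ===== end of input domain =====

-- B replaces A's O(k^2) nested pair loop and reduce-over-range with one pass (sum and sum of squares) and closed forms; proved equal on all inputs.


-- ===== PORT A =====
-- transliteration of A: reduce over range(0, rest) and the nested enumerate/slice loop
def get_total_combinations (astronaut_groups : List Int) (n : Int) : Int :=
  let rest := n - astronaut_groups.sum
  let rest_countries_combinations : Int :=
    if rest > 0 then
      match PySem.List.pyRange 0 rest 1 with
      | [] => 0            -- unreachable under rest > 0 (reduce needs a nonempty list)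
      | h :: t => t.foldl (fun x y => x + y) h
    else 0
  let p := (PySem.List.enumerate astronaut_groups 0).foldl
    (fun (acc : Int × Int) ig =>
      (acc.1 + ig.2 * rest,
       (PySem.List.slice astronaut_groups (some (ig.1 + 1)) none).foldl
         (fun c f => c + ig.2 * f) acc.2))
    (0, 0)
  p.2 + p.1 + rest_countries_combinations

-- ===== PORT B =====
-- one pass for sum and sum of squares, then closed forms
def get_total_combinations_alt (astronaut_groups : List Int) (n : Int) : Int :=
  let sq := astronaut_groups.foldl (fun (a : Int × Int) g => (a.1 + g, a.2 + g * g)) (0, 0)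
  let rest := n - sq.1
  let pair_groups := PySem.Int.floordiv (sq.1 * sq.1 - sq.2) 2
  let rest_pairs := if rest > 0 then PySem.Int.floordiv (rest * (rest - 1)) 2 else 0
  pair_groups + sq.1 * rest + rest_pairs

-- ===== PRECONDITION & SPEC =====
def Spec_get_total_combinations (astronaut_groups : List Int) (n : Int) (out : Int) : Prop := out = get_total_combinations_alt astronaut_groups n
instance (astronaut_groups : List Int) (n : Int) (out : Int) : Decidable (Spec_get_total_combinations astronaut_groups n out) := by unfold Spec_get_total_combinations; infer_instance

-- ===== CLAIM (what is proved, stated in full; the proofs are below) =====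
def Claim_equal_get_total_combinations : Prop := ∀ (astronaut_groups : List Int) (n : Int), Dom_get_total_combinations astronaut_groups n → Spec_get_total_combinations astronaut_groups n (get_total_combinations astronaut_groups n)

-- ===== LEMMAS AND PROOFS =====

def pairSum : List Int → Int
  | [] => 0
  | g :: t => g * t.sum + pairSum t

theorem fd_two_mul (p : Int) : PySem.Int.floordiv (2 * p) 2 = p := by
  rw [PySem.Int.floordiv_eq_ediv_of_pos (by norm_num)]
  omega

theorem two_pairSum (l : List Int) : 2 * pairSum l = l.sum * l.sum - (l.map (fun g => g * g)).sum := by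
  induction l with
  | nil => simp [pairSum]
  | cons g t ih => simp only [pairSum, List.sum_cons, List.map_cons]; ring_nf; ring_nf at ih; omega

theorem sq_fold (l : List Int) : ∀ a b : Int,
    l.foldl (fun (p : Int × Int) g => (p.1 + g, p.2 + g * g)) (a, b)
      = (a + l.sum, b + (l.map (fun g => g * g)).sum) := by
  induction l with
  | nil => simp
  | cons g t ih =>
    intro a b
    simp only [List.foldl_cons, List.sum_cons, List.map_cons, ih, List.sum_cons, Prod.mk.injEq]
    constructor <;> ring

theorem foldl_add_id : ∀ (t : List Int) (b : Int), t.foldl (fun x y => x + y) b = b + t.sum := by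
  intro t
  induction t with
  | nil => simp
  | cons x xs ih => intro b; simp only [List.foldl_cons, List.sum_cons, ih]; ring

theorem foldl_addmul (g : Int) : ∀ (t : List Int) (b : Int),
    t.foldl (fun c f => c + g * f) b = b + g * t.sum := by
  intro t
  induction t with
  | nil => simp
  | cons x xs ih => intro b; simp only [List.foldl_cons, List.sum_cons, ih]; ring

theorem two_sum_pyRange (r : Int) (hr : 0 ≤ r) :
    2 * (PySem.List.pyRange 0 r 1).sum = r * (r - 1) := by
  induction r, hr using Int.le_induction with
  | base => simp
  | succ r hr ih =>
    rw [PySem.List.pyRange_one_succ_right hr]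
    simp only [List.sum_append, List.sum_cons, List.sum_nil]
    ring_nf
    ring_nf at ih
    omega

theorem loopA (full : List Int) (rest : Int) :
    ∀ (gs : List Int) (k : Nat) (a b : Int), full.drop k = gs →
    (PySem.List.enumerate gs (k : Int)).foldl
      (fun (acc : Int × Int) ig =>
        (acc.1 + ig.2 * rest,
         (PySem.List.slice full (some (ig.1 + 1)) none).foldl
           (fun c f => c + ig.2 * f) acc.2))
      (a, b)
    = (a + gs.sum * rest, b + pairSum gs) := by
  intro gs
  induction gs with
  | nil => intro k a b _; simp [PySem.List.enumerate, pairSum]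
  | cons g t ih =>
    intro k a b hdrop
    have ht : full.drop (k + 1) = t := by
      have h2 := congrArg (List.drop 1) hdrop
      simp only [List.drop_drop] at h2
      simpa [Nat.add_comm] using h2
    have hcast : ((k : Int) + 1) = ((k + 1 : Nat) : Int) := by push_cast; ring
    rw [PySem.List.enumerate_cons]
    simp only [List.foldl_cons]
    rw [hcast, PySem.List.slice_from_natCast, ht, foldl_addmul, ih (k + 1) _ _ ht]
    simp only [pairSum, List.sum_cons, Prod.mk.injEq]
    constructor <;> ring

-- ===== VERDICT (by name: the statement is the Claim_ definition above) =====
theorem get_total_combinations_spec : Claim_equal_get_total_combinations := by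
  intro gs n _
  show get_total_combinations gs n = get_total_combinations_alt gs n
  simp only [get_total_combinations, get_total_combinations_alt, sq_fold, zero_add]
  have hl := loopA gs (n - gs.sum) gs 0 0 0 rfl
  push_cast at hl
  rw [hl]
  have hpg : PySem.Int.floordiv (gs.sum * gs.sum - (gs.map (fun g => g * g)).sum) 2 = pairSum gs := by
    rw [← two_pairSum, fd_two_mul]
  rw [hpg]
  simp only [zero_add]
  split_ifs with h1
  · have hcons := PySem.List.pyRange_one_cons (a := 0) (b := n - gs.sum) (by omega)
    have hsum := two_sum_pyRange (n - gs.sum) (by omega)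
    rw [hcons] at hsum ⊢
    simp only [List.sum_cons, zero_add] at hsum
    simp only [foldl_add_id, zero_add]
    have hfd : PySem.Int.floordiv ((n - gs.sum) * (n - gs.sum - 1)) 2
        = (PySem.List.pyRange 1 (n - gs.sum) 1).sum := by
      rw [← hsum, fd_two_mul]
    rw [hfd]
  · ring
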